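-- pv_equiv track=rewrite | github.com/Nama21yo/NatnaelHackerrank | leetcode_premium/Two_pointer/valid_palindrome_IV_2330.py | valid_palindrome_IV
-- ===== SOURCE A (Python) =====
-- def valid_palindrome_IV(s):
--         count = 0
--         n = len(s)
--         i = (n // 2 - 1) if n % 2 == 0 else (n // 2)
--         l = i
--         r = i + 1 if n % 2 == 0 else i
--         while l >= 0 and r < n:
--             if s[l] != s[r]:
--                 count += 1
--             l -= 1
--             r += 1
--         return count <= 2
-- ===== SOURCE B (Python) =====
-- def valid_palindrome_IV(s):
--     mismatches = sum(1 for a, b in zip(s, s[::-1]) if a != b)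
--     return mismatches // 2 <= 2
-- ===== Notes on version B (the rewrite author's own statement) =====
-- stated objective: simpler
-- what changed: B replaces A's centre-outward two-pointer while loop with a single comparison of the string against its reverse, counting all mismatched positions (each mismatched symmetric pair counted twice) and halving the total.
import Mathlib
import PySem

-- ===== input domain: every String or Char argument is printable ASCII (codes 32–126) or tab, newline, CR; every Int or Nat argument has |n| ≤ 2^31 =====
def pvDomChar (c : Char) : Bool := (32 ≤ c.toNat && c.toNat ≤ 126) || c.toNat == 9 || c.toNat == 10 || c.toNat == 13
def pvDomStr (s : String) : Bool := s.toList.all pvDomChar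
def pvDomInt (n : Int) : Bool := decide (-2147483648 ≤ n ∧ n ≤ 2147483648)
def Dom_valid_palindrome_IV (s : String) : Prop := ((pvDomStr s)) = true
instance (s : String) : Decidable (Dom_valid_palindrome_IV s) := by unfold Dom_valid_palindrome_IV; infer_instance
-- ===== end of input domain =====

-- B replaces A's centre-outward two-pointer loop by comparing the string with its
-- reverse, counting all mismatched positions and halving; same O(n) cost, simpler.

-- ===== PORT A =====
-- the while loop of A: state (l, r, count); terminates because n - r decreases
def pvLoopA (cs : List Char) (n : Int) (l r count : Int) : Int :=
  if h : l ≥ 0 ∧ r < n then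
    pvLoopA cs n (l - 1) (r + 1)
      (if PySem.List.pyGet? cs l ≠ PySem.List.pyGet? cs r then count + 1 else count)
  else count
termination_by (n - r).toNat
decreasing_by omega

def valid_palindrome_IV (s : String) : Bool :=
  let count : Int := 0
  let cs := s.toList
  let n : Int := cs.length
  let i : Int := if PySem.Int.mod n 2 = 0 then PySem.Int.floordiv n 2 - 1 else PySem.Int.floordiv n 2
  let l : Int := i
  let r : Int := if PySem.Int.mod n 2 = 0 then i + 1 else i
  decide (pvLoopA cs n l r count ≤ 2)

-- ===== PORT B =====
def valid_palindrome_IV_alt (s : String) : Bool :=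
  let cs := s.toList
  let rev := (PySem.List.slice? cs none none (-1)).getD []   -- s[::-1]
  let mismatches : Int := (cs.zip rev).foldl (fun c ab => if ab.1 ≠ ab.2 then c + 1 else c) 0
  decide (PySem.Int.floordiv mismatches 2 ≤ 2)

-- ===== PRECONDITION & SPEC =====
def Spec_valid_palindrome_IV (s : String) (out : Bool) : Prop := out = valid_palindrome_IV_alt s
instance (s : String) (out : Bool) : Decidable (Spec_valid_palindrome_IV s out) := by unfold Spec_valid_palindrome_IV; infer_instance

-- ===== CLAIM (what is proved, stated in full; the proofs are below) =====
def Claim_equal_valid_palindrome_IV : Prop := ∀ (s : String), Dom_valid_palindrome_IV s → Spec_valid_palindrome_IV s (valid_palindrome_IV s)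

-- ===== LEMMAS AND PROOFS =====

-- indicator of a mismatched symmetric pair at position k
def pvInd (cs : List Char) (k : Nat) : Int :=
  if cs.getD k ' ' ≠ cs.getD (cs.length - 1 - k) ' ' then 1 else 0

theorem pvInd_symm (cs : List Char) (k : Nat) (hk : k < cs.length) :
    pvInd cs (cs.length - 1 - k) = pvInd cs k := by
  unfold pvInd
  have : cs.length - 1 - (cs.length - 1 - k) = k := by omega
  rw [this]
  by_cases h : cs.getD k ' ' = cs.getD (cs.length - 1 - k) ' '
  · rw [if_neg (fun hc => hc h.symm), if_neg (fun hc => hc h)]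
  · rw [if_pos (fun hc => h hc.symm), if_pos h]

theorem pvInd_mid (cs : List Char) (k : Nat) (h : cs.length - 1 - k = k) : pvInd cs k = 0 := by
  simp [pvInd, h]

-- A's loop, under its invariant r = n - 1 - l, accumulates the mismatch indicators below l
theorem pvLoopA_eq (cs : List Char) (t : Nat) : ∀ (l : Int) (c : Int),
    l + 1 = t → l < (cs.length : Int) →
    pvLoopA cs (cs.length) l ((cs.length : Int) - 1 - l) c
      = c + ∑ k ∈ Finset.range t, pvInd cs k := by
  induction t with
  | zero =>
    intro l c hl _
    rw [pvLoopA]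
    simp; omega
  | succ m ih =>
    intro l c hl hln
    have hl0 : l = (m : Int) := by omega
    subst hl0
    rw [pvLoopA]
    have hcond : (m : Int) ≥ 0 ∧ (cs.length : Int) - 1 - m < (cs.length : Int) := by
      constructor <;> omega
    rw [dif_pos hcond]
    have hstep : (cs.length : Int) - 1 - (m : Int) + 1 = (cs.length : Int) - 1 - ((m : Int) - 1) := by ring
    rw [hstep]
    have hrec := ih ((m : Int) - 1)
      ((if PySem.List.pyGet? cs (m : Int) ≠ PySem.List.pyGet? cs ((cs.length : Int) - 1 - m) then c + 1 else c))
      (by omega) (by omega)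
    rw [hrec]
    have hmlt : m < cs.length := by omega
    have hGet1 : PySem.List.pyGet? cs (m : Int) = some (cs.getD m ' ') := by
      simp [PySem.List.pyGet?, PySem.List.pyIdx?, hmlt, List.getD_eq_getElem?_getD]
    have hidx : ((cs.length : Int) - 1 - (m : Int)) = ((cs.length - 1 - m : Nat) : Int) := by omega
    have hmlt2 : cs.length - 1 - m < cs.length := by omega
    have hGet2 : PySem.List.pyGet? cs ((cs.length : Int) - 1 - (m : Int)) = some (cs.getD (cs.length - 1 - m) ' ') := by
      rw [hidx]
      simp [PySem.List.pyGet?, PySem.List.pyIdx?, hmlt2, List.getD_eq_getElem?_getD]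
    rw [hGet1, hGet2, Finset.sum_range_succ]
    have hiv : pvInd cs m = if cs.getD m ' ' ≠ cs.getD (cs.length - 1 - m) ' ' then 1 else 0 := rfl
    rw [hiv]
    by_cases h : cs.getD m ' ' = cs.getD (cs.length - 1 - m) ' '
    · rw [if_neg (fun hc => hc (by rw [h])), if_neg (fun hc => hc h)]; ring
    · rw [if_pos (fun hc => h (Option.some.inj hc)), if_pos h]; ring

-- B's fold counts mismatched positions of the zip
theorem pvFold_count (xs : List (Char × Char)) : ∀ (c : Int),
    xs.foldl (fun c ab => if ab.1 ≠ ab.2 then c + 1 else c) c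
      = c + (xs.countP (fun ab => ab.1 ≠ ab.2) : Int) := by
  induction xs with
  | nil => intro c; simp
  | cons x xs ih =>
    intro c
    simp only [List.foldl_cons, List.countP_cons, ih]
    by_cases h : x.1 = x.2
    · simp [h]
    · simp [h]; ring

-- countP as a sum of indexwise indicators
theorem pvCountP_sum (xs : List (Char × Char)) (p : Char × Char → Bool) :
    (xs.countP p : Int) = ∑ k ∈ Finset.range xs.length, (if p (xs.getD k (' ', ' ')) then (1 : Int) else 0) := by
  induction xs with
  | nil => simp
  | cons x xs ih =>
    rw [List.countP_cons]
    simp only [List.length_cons]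
    rw [Finset.sum_range_succ']
    simp only [List.getD_cons_succ, List.getD_cons_zero]
    by_cases h : p x = true
    · simp [h, ih]
    · simp [h, ih]

-- zip with the reverse: the indicator at k is pvInd cs k
theorem pvZip_ind (cs : List Char) (k : Nat) (hk : k < cs.length) :
    (if ((cs.zip cs.reverse).getD k (' ', ' ')).1 ≠ ((cs.zip cs.reverse).getD k (' ', ' ')).2 then (1 : Int) else 0)
      = pvInd cs k := by
  have hlen : (cs.zip cs.reverse).length = cs.length := by simp
  have hk' : k < (cs.zip cs.reverse).length := by omega
  rw [List.getD_eq_getElem _ _ hk']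
  have h1 : (cs.zip cs.reverse)[k] = (cs[k], cs.reverse[k]'(by simpa using hk)) := by
    simp [List.getElem_zip]
  rw [h1]
  have h2 : cs.reverse[k]'(by simpa using hk) = cs[cs.length - 1 - k]'(by omega) := by
    rw [List.getElem_reverse]
  rw [h2]
  unfold pvInd
  rw [List.getD_eq_getElem _ _ hk, List.getD_eq_getElem _ _ (by omega : cs.length - 1 - k < cs.length)]

theorem pvSum_reflect (cs : List Char) (m : Nat) (off : Nat)
    (hoff : ∀ j < m, off + j < cs.length ∧ cs.length - 1 - (off + j) = m - 1 - j ∧ m - 1 - j < cs.length) :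
    ∑ j ∈ Finset.range m, pvInd cs (off + j) = ∑ j ∈ Finset.range m, pvInd cs j := by
  have h1 : ∀ j ∈ Finset.range m, pvInd cs (off + j) = pvInd cs (m - 1 - j) := by
    intro j hj
    rw [Finset.mem_range] at hj
    obtain ⟨hlt, heq, _⟩ := hoff j hj
    rw [← heq, pvInd_symm cs _ hlt]
  rw [Finset.sum_congr rfl h1]
  have := Finset.sum_range_reflect (fun j => pvInd cs j) m
  simpa using this

theorem pvSum_even (cs : List Char) (m : Nat) (h : cs.length = 2 * m) :
    ∑ k ∈ Finset.range cs.length, pvInd cs k = 2 * ∑ k ∈ Finset.range m, pvInd cs k := by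
  rw [h, two_mul m, Finset.sum_range_add]
  have := pvSum_reflect cs m m (by intro j hj; omega)
  rw [this]; ring

theorem pvSum_odd (cs : List Char) (m : Nat) (h : cs.length = 2 * m + 1) :
    ∑ k ∈ Finset.range cs.length, pvInd cs k = 2 * ∑ k ∈ Finset.range m, pvInd cs k := by
  have h' : cs.length = m + 1 + m := by omega
  rw [h', Finset.sum_range_add, Finset.sum_range_succ]
  have hmid : pvInd cs m = 0 := pvInd_mid cs m (by omega)
  have := pvSum_reflect cs m (m + 1) (by intro j hj; omega)
  rw [this, hmid]; ring

-- ===== VERDICT (by name: the statement is the Claim_ definition above) =====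
theorem valid_palindrome_IV_spec : Claim_equal_valid_palindrome_IV := by
  intro s _
  unfold Spec_valid_palindrome_IV valid_palindrome_IV valid_palindrome_IV_alt
  simp only [PySem.List.slice?_none_none_neg_one, Option.getD_some]
  set cs := s.toList with hcs
  set n := cs.length with hn
  -- B's count
  rw [pvFold_count, pvCountP_sum]
  have hzl : (cs.zip cs.reverse).length = n := by simp; exact hn.symm
  rw [hzl]
  simp only [decide_eq_true_eq]
  have hB : (∑ k ∈ Finset.range n, if ((cs.zip cs.reverse).getD k (' ', ' ')).1 ≠ ((cs.zip cs.reverse).getD k (' ', ' ')).2 then (1 : Int) else 0)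
      = ∑ k ∈ Finset.range n, pvInd cs k := by
    apply Finset.sum_congr rfl
    intro k hk
    rw [Finset.mem_range] at hk
    exact pvZip_ind cs k hk
  rw [hB]
  -- case on parity
  rcases Nat.even_or_odd n with ⟨m, hm⟩ | ⟨m, hm⟩
  · -- even: n = 2m
    have hm' : n = 2 * m := by omega
    have hmod : PySem.Int.mod (n : Int) 2 = 0 := by
      rw [PySem.Int.mod_eq_emod_of_pos (by norm_num : (0:Int) < 2)]; omega
    have hdiv : PySem.Int.floordiv (n : Int) 2 = (m : Int) := by
      rw [PySem.Int.floordiv_eq_ediv_of_pos (by norm_num : (0:Int) < 2)]; omega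
    rw [if_pos hmod, if_pos hmod, hdiv]
    have hsum := pvSum_even cs m hm'
    rw [← hn] at hsum
    rcases Nat.eq_zero_or_pos m with hm0 | hm0
    · subst hm0
      have hn0 : n = 0 := by omega
      rw [pvLoopA]
      rw [dif_neg (by omega)]
      rw [hsum]
      norm_num [PySem.Int.floordiv_eq_ediv_of_pos (by norm_num : (0:Int) < 2)]
    · have hA := pvLoopA_eq cs m ((m : Int) - 1) 0 (by omega) (by omega)
      rw [← hn] at hA
      have hidx : ((n : Int)) - 1 - ((m : Int) - 1) = (m : Int) := by omega
      rw [hidx] at hA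
      rw [show ((m:Int) - 1 + 1) = (m:Int) by ring, hA, hsum]
      have hfd : PySem.Int.floordiv (0 + 2 * ∑ k ∈ Finset.range m, pvInd cs k) 2 = ∑ k ∈ Finset.range m, pvInd cs k := by
        rw [PySem.Int.floordiv_eq_ediv_of_pos (by norm_num : (0:Int) < 2)]
        omega
      rw [hfd]
      norm_num
  · -- odd: n = 2m+1
    have hm' : n = 2 * m + 1 := by omega
    have hmod : ¬ PySem.Int.mod (n : Int) 2 = 0 := by
      rw [PySem.Int.mod_eq_emod_of_pos (by norm_num : (0:Int) < 2)]; omega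
    have hdiv : PySem.Int.floordiv (n : Int) 2 = (m : Int) := by
      rw [PySem.Int.floordiv_eq_ediv_of_pos (by norm_num : (0:Int) < 2)]; omega
    rw [if_neg hmod, if_neg hmod, hdiv]
    have hsum := pvSum_odd cs m hm'
    rw [← hn] at hsum
    have hA := pvLoopA_eq cs (m + 1) (m : Int) 0 (by push_cast; ring) (by omega)
    rw [← hn] at hA
    have hidx : ((n : Int)) - 1 - (m : Int) = (m : Int) := by omega
    rw [hidx] at hA
    rw [hA, hsum]
    have hmid : pvInd cs m = 0 := pvInd_mid cs m (by rw [← hn]; omega)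
    rw [Finset.sum_range_succ, hmid]
    have hfd : PySem.Int.floordiv (0 + 2 * ∑ k ∈ Finset.range m, pvInd cs k) 2 = ∑ k ∈ Finset.range m, pvInd cs k := by
      rw [PySem.Int.floordiv_eq_ediv_of_pos (by norm_num : (0:Int) < 2)]
      omega
    rw [hfd]
    norm_num
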